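-- pv_equiv track=rewrite | github.com/msegreto/SemanticChunking | src/splitting/sentence.py | _split_text_in_batches
-- ===== SOURCE A (Python) =====
-- from typing import Any, Dict, Iterable, List
--
-- def _split_text_in_batches(text: str, max_chars: int) -> List[tuple[int, str]]:
--     if len(text) <= max_chars:
--         return [(0, text)]
--
--     batches: List[tuple[int, str]] = []
--     start = 0
--     text_length = len(text)
--
--     while start < text_length:
--         end = min(start + max_chars, text_length)
--         if end < text_length:
--             boundary = text.rfind(" ", start, end)
--             if boundary > start:
--                 end = boundary
--
--         chunk = text[start:end]
--         if not chunk: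
--             end = min(start + max_chars, text_length)
--             chunk = text[start:end]
--             if not chunk:
--                 break
--
--         batches.append((start, chunk))
--         start = end
--
--         while start < text_length and text[start].isspace():
--             start += 1
--
--     return batches
-- ===== SOURCE B (Python) =====
-- from typing import List
--
--
-- def _split_text_in_batches(text: str, max_chars: int) -> List[tuple[int, str]]:
--     if len(text) <= max_chars:
--         return [(0, text)]
--     if max_chars <= 0:
--         return []
--
--     n = len(text)
--     batches: List[tuple[int, str]] = []
--     start = 0
--     last_space = -1  # most recent space index seen in the current window
--     i = 0
--     while i < n:
--         if i - start == max_chars: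
--             # window full and truncated: cut at the last space strictly after start
--             end = last_space if last_space > start else i
--             batches.append((start, text[start:end]))
--             start = end
--             while start < n and text[start].isspace():
--                 start += 1
--             last_space = -1
--             i = start
--         else:
--             if text[i] == " ":
--                 last_space = i
--             i += 1
--     if start < n:
--         batches.append((start, text[start:n]))
--     return batches
-- ===== Notes on version B (the rewrite author's own statement) =====
-- stated objective: alternative
-- what changed: A re-scans each window backwards with str.rfind and restarts per batch; B makes a single forward scan over the characters, tracking the index of the last space seen in the current window and emitting a batch the moment the window fills.
-- outside the precondition, e.g. on _split_text_in_batches('aaaa', -2): A returns [(0, 'aa'), (-2, 'a')], B returns []; on _split_text_in_batches('ab', -1): A returns [(0, 'a')], B returns []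
import Mathlib
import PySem

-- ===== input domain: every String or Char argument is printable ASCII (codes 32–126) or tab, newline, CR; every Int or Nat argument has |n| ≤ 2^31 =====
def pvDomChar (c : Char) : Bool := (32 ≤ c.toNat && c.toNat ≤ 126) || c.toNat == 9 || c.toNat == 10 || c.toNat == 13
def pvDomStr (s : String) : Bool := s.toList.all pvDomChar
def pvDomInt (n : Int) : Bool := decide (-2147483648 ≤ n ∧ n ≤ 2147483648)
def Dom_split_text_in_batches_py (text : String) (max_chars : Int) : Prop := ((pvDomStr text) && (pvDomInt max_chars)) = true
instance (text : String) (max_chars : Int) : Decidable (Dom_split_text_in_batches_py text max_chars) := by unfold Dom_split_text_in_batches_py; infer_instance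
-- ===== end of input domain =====

-- B replaces A's per-batch rfind-and-resume scheme by one forward character scan that
-- tracks the last seen space and emits a batch whenever the window fills
-- (objective: alternative decomposition; no speed claim).  Equivalence is claimed on Pre_ (0 ≤ max_chars).

-- ===== PORT A =====
-- shared inner while-loop of both Pythons: `while start < n and text[start].isspace(): start += 1`
def pvSkipSpaces (l : List Char) (s : Nat) : Nat :=
  if h : s < l.length ∧ PySem.Chars.isspace (l.getD s ' ') then pvSkipSpaces l (s + 1) else s
termination_by l.length - s
decreasing_by omega

-- text.rfind(" ", a, a + k): backward scan, exact for 0 ≤ a ≤ a + k ≤ len(text)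
-- (under Pre_ every call of A's loop satisfies this)
def pvRfindSpace (l : List Char) (a : Nat) : Nat → Int
  | 0 => -1
  | k + 1 => if l.getD (a + k) ' ' = ' ' then ((a + k : Nat) : Int) else pvRfindSpace l a k

-- A's while-loop; fuel-structured (the loop runs at most len+1 iterations whenever
-- 0 ≤ max_chars, so the fuel len+2 passed below is never exhausted under Pre_).
-- Nat indices: exact under Pre_ (0 ≤ max_chars), where every Python index involved is ≥ 0.
def pvALoop (l : List Char) (mx : Int) : Nat → Nat → List (Int × String)
  | 0, _ => []
  | fuel + 1, start =>
    if start < l.length then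
      -- end = min(start + max_chars, text_length)
      let e1 : Nat := min ((start : Int) + mx).toNat l.length
      -- if end < text_length: boundary = text.rfind(" ", start, end); if boundary > start: end = boundary
      let e : Nat :=
        if e1 < l.length then
          let b : Int := pvRfindSpace l start (e1 - start)
          if b > (start : Int) then b.toNat else e1
        else e1
      let chunk := (l.drop start).take (e - start)          -- chunk = text[start:end]
      if chunk = [] then
        let chunk2 := (l.drop start).take (e1 - start)
        if chunk2 = [] then []                               -- break
        else ((start : Int), String.ofList chunk2) :: pvALoop l mx fuel (pvSkipSpaces l e1)
      else ((start : Int), String.ofList chunk) :: pvALoop l mx fuel (pvSkipSpaces l e)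
    else []

def split_text_in_batches_py (text : String) (max_chars : Int) : List (Int × String) :=
  let l := text.toList
  if (l.length : Int) ≤ max_chars then [(0, text)]
  else pvALoop l max_chars (l.length + 2) 0

-- ===== PORT B =====
-- B's single forward scan over i, fuel-structured; the loop takes at most
-- (len+1)*(len+2) steps (each batch advances start, each other step advances i),
-- so the fuel passed below is never exhausted.
def pvBLoop (l : List Char) (m : Nat) : Nat → Nat → Nat → Int → List (Int × String)
  | 0, _, _, _ => []
  | fuel + 1, start, i, lastSpace =>
    if i < l.length then
      if (i : Int) - (start : Int) = (m : Int) then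
        -- window full and truncated: cut at the last space strictly after start
        let e : Nat := if lastSpace > (start : Int) then lastSpace.toNat else i
        let start' := pvSkipSpaces l e
        ((start : Int), String.ofList ((l.drop start).take (e - start))) ::
          pvBLoop l m fuel start' start' (-1)
      else
        let ls' : Int := if l.getD i ' ' = ' ' then (i : Nat) else lastSpace
        pvBLoop l m fuel start (i + 1) ls'
    else
      if start < l.length then
        [((start : Int), String.ofList ((l.drop start).take (l.length - start)))]
      else []

def split_text_in_batches_py_alt (text : String) (max_chars : Int) : List (Int × String) :=
  let l := text.toList
  if (l.length : Int) ≤ max_chars then [(0, text)]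
  else if max_chars ≤ 0 then []
  else pvBLoop l max_chars.toNat ((l.length + 1) * (l.length + 2)) 0 0 (-1)

-- ===== PRECONDITION & SPEC =====
-- Pre_ excludes negative max_chars (a nonsensical batch size, outside the natural
-- domain): there Python's negative slice/rfind wraparound makes A diverge on some
-- texts and return accidental wrapped batches (even with negative offsets) on others.
def Pre_split_text_in_batches_py (text : String) (max_chars : Int) : Prop := 0 ≤ max_chars
instance (text : String) (max_chars : Int) : Decidable (Pre_split_text_in_batches_py text max_chars) := by
  unfold Pre_split_text_in_batches_py; infer_instance

def pvWitness_split_text_in_batches_py : String × Int := ("hello world", 4)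

def Spec_split_text_in_batches_py (text : String) (max_chars : Int) (out : List (Int × String)) : Prop := out = split_text_in_batches_py_alt text max_chars
instance (text : String) (max_chars : Int) (out : List (Int × String)) : Decidable (Spec_split_text_in_batches_py text max_chars out) := by unfold Spec_split_text_in_batches_py; infer_instance

-- ===== CLAIM (what is proved, stated in full; the proofs are below) =====
def Claim_equal_split_text_in_batches_py : Prop := ∀ (text : String) (max_chars : Int), Dom_split_text_in_batches_py text max_chars → Pre_split_text_in_batches_py text max_chars → Spec_split_text_in_batches_py text max_chars (split_text_in_batches_py text max_chars)

-- ===== LEMMAS AND PROOFS =====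

theorem pvSkipSpaces_ge (l : List Char) (s : Nat) : s ≤ pvSkipSpaces l s := by
  fun_induction pvSkipSpaces l s with
  | case1 s h ih => omega
  | case2 s h => omega

theorem pvSkipSpaces_of_ge (l : List Char) (s : Nat) (h : l.length ≤ s) : pvSkipSpaces l s = s := by
  rw [pvSkipSpaces]; simp; omega

-- one forward step of the last-space accumulator is one layer of the backward rfind scan
theorem pvRfindSpace_succ (l : List Char) (a i : Nat) (h : a ≤ i) :
    pvRfindSpace l a (i + 1 - a) =
      if l.getD i ' ' = ' ' then ((i : Nat) : Int) else pvRfindSpace l a (i - a) := by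
  have h1 : i + 1 - a = (i - a) + 1 := by omega
  have h2 : a + (i - a) = i := by omega
  rw [h1, pvRfindSpace, h2]

-- the common batch-by-batch description both loops compute
def pvSpec (l : List Char) (m : Nat) (hm : 1 ≤ m) (start : Nat) : List (Int × String) :=
  if h : start < l.length then
    let stop := min (start + m) l.length
    let b : Int := if stop < l.length then pvRfindSpace l start (stop - start) else -1
    let e : Nat := if b > (start : Int) then b.toNat else stop
    ((start : Int), String.ofList ((l.drop start).take (e - start))) ::
      pvSpec l m hm (pvSkipSpaces l e)
  else []
termination_by l.length - start
decreasing_by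
  refine Nat.sub_lt_sub_left h (lt_of_lt_of_le ?_ (pvSkipSpaces_ge l _))
  split <;> (try split) <;> omega

theorem take_drop_ne_nil (l : List Char) (a e : Nat) (ha : a < l.length) (he : a < e) :
    (l.drop a).take (e - a) ≠ [] := by
  have hlen : ((l.drop a).take (e - a)).length = min (e - a) (l.length - a) := by simp
  intro hnil
  rw [hnil] at hlen
  simp at hlen
  omega

theorem pvALoop_eq_spec (l : List Char) (mx : Int) (hmx : 1 ≤ mx) (hm : 1 ≤ mx.toNat)
    (fuel start : Nat) (hf : l.length - start < fuel) :
    pvALoop l mx fuel start = pvSpec l mx.toNat hm start := by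
  induction fuel generalizing start with
  | zero => omega
  | succ fuel ih =>
    rw [pvSpec]
    have he1 : ((start : Int) + mx).toNat = start + mx.toNat := by omega
    simp only [pvALoop, he1]
    by_cases h : start < l.length
    · simp only [if_pos h, dif_pos h]
      have hstopgt : start < min (start + mx.toNat) l.length := by omega
      have hskip : ∀ e : Nat, start < e → l.length - pvSkipSpaces l e < fuel := by
        intro e hse
        have := pvSkipSpaces_ge l e
        omega
      by_cases h2 : min (start + mx.toNat) l.length < l.length
      · simp only [if_pos h2]
        by_cases h3 : pvRfindSpace l start (min (start + mx.toNat) l.length - start) > (start : Int)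
        · simp only [if_pos h3]
          have hegt : start < (pvRfindSpace l start (min (start + mx.toNat) l.length - start)).toNat := by omega
          rw [if_neg (take_drop_ne_nil l start _ h hegt)]
          rw [ih _ (hskip _ hegt)]
        · simp only [if_neg h3]
          rw [if_neg (take_drop_ne_nil l start _ h hstopgt)]
          rw [ih _ (hskip _ hstopgt)]
      · simp only [if_neg h2]
        have hneg : ¬ ((-1 : Int) > (start : Nat)) := by omega
        rw [if_neg hneg]
        rw [if_neg (take_drop_ne_nil l start _ h hstopgt)]
        rw [ih _ (hskip _ hstopgt)]
    · simp [h]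

theorem pvSkipSpaces_le (l : List Char) (s : Nat) : pvSkipSpaces l s ≤ max s l.length := by
  fun_induction pvSkipSpaces l s with
  | case1 s h ih => omega
  | case2 s h => omega

theorem pvRfindSpace_lt (l : List Char) (a : Nat) : ∀ k, pvRfindSpace l a k < ((a + k : Nat) : Int) := by
  intro k
  induction k with
  | zero =>
    simp only [pvRfindSpace]
    omega
  | succ k ih =>
    rw [pvRfindSpace]
    split
    · omega
    · omega

theorem pvBLoop_eq_spec (l : List Char) (m : Nat) (hm : 1 ≤ m)
    (fuel start i : Nat) (hsi : start ≤ i) (hi : i ≤ min (start + m) l.length)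
    (hf : (l.length - start) * (l.length + 2) + (min (start + m) l.length - i) < fuel) :
    pvBLoop l m fuel start i (pvRfindSpace l start (i - start)) = pvSpec l m hm start := by
  induction fuel generalizing start i with
  | zero => exact absurd hf (Nat.not_lt_zero _)
  | succ fuel ih =>
    simp only [pvBLoop]
    by_cases hil : i < l.length
    · rw [if_pos hil]
      by_cases hemit : ((i : Int) - (start : Int) = (m : Int))
      · rw [if_pos hemit]
        have him : i = start + m := by omega
        have hstop : min (start + m) l.length = i := by omega
        have hspos : start < l.length := by omega
        rw [pvSpec]
        simp only [dif_pos hspos, hstop, if_pos hil]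
        have hlsbound := pvRfindSpace_lt l start (i - start)
        have hisub : start + (i - start) = i := by omega
        rw [hisub] at hlsbound
        -- the cut position is the same on both sides; name it E
        set E : Nat := if pvRfindSpace l start (i - start) > (start : Int) then
            (pvRfindSpace l start (i - start)).toNat else i with hE
        have hEgt : start < E := by rw [hE]; split <;> omega
        have hEle : E ≤ l.length := by rw [hE]; split <;> omega
        have hsk1 := pvSkipSpaces_ge l E
        have hsk2 := pvSkipSpaces_le l E
        congr 1
        have hd : l.length - pvSkipSpaces l E < l.length - start := by omega
        -- fuel accounting: one batch consumed at least one character of budget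
        have harith : (l.length - pvSkipSpaces l E) * (l.length + 2) +
            (min (pvSkipSpaces l E + m) l.length - pvSkipSpaces l E) < fuel := by
          have e1 : (l.length - pvSkipSpaces l E) + 1 ≤ l.length - start := by omega
          have e2 : ((l.length - pvSkipSpaces l E) + 1) * (l.length + 2) ≤
              (l.length - start) * (l.length + 2) := Nat.mul_le_mul_right _ e1
          have e3 : min (pvSkipSpaces l E + m) l.length - pvSkipSpaces l E ≤ l.length := by omega
          have e4 : ((l.length - pvSkipSpaces l E) + 1) * (l.length + 2) =
              (l.length - pvSkipSpaces l E) * (l.length + 2) + (l.length + 2) := by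
            rw [Nat.add_mul, Nat.one_mul]
          generalize (l.length - pvSkipSpaces l E) * (l.length + 2) = P at e2 e4 ⊢
          generalize (l.length - start) * (l.length + 2) = Q at hf e2
          omega
        have := ih (pvSkipSpaces l E) (pvSkipSpaces l E) (le_refl _) (by omega) harith
        simpa using this
      · rw [if_neg hemit]
        have hlt : i < min (start + m) l.length := by omega
        rw [← pvRfindSpace_succ l start i hsi]
        refine ih start (i + 1) (by omega) (by omega) ?_
        generalize (l.length - start) * (l.length + 2) = P at hf ⊢
        omega
    · rw [if_neg hil]
      have hieq : i = l.length := by omega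
      by_cases hs : start < l.length
      · rw [if_pos hs, pvSpec]
        have hmin : min (start + m) l.length = l.length := by omega
        have h2 : ¬ (l.length < l.length) := by omega
        have h3 : ¬ ((-1 : Int) > ((start : Nat) : Int)) := by omega
        simp only [dif_pos hs, hmin, if_neg h2, if_neg h3]
        rw [pvSkipSpaces_of_ge l l.length (le_refl _), pvSpec]
        simp
      · rw [if_neg hs, pvSpec, dif_neg hs]

-- ===== VERDICT (by name: the statement is the Claim_ definition above) =====
theorem split_text_in_batches_py_spec : Claim_equal_split_text_in_batches_py := by
  intro text mx hdom hpre
  have hpre' : 0 ≤ mx := hpre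
  unfold Spec_split_text_in_batches_py split_text_in_batches_py split_text_in_batches_py_alt
  by_cases h1 : ((text.toList.length : Int) ≤ mx)
  · simp only [if_pos h1]
  · simp only [if_neg h1]
    by_cases h2 : mx ≤ 0
    · have hmx0 : mx = 0 := le_antisymm h2 hpre'
      subst hmx0
      have hn : 0 < text.toList.length := by omega
      rw [if_pos (le_refl (0 : Int)), pvALoop]
      simp [pvRfindSpace]
    · have hmx1 : 1 ≤ mx := by omega
      have hm : 1 ≤ mx.toNat := by omega
      rw [if_neg h2, pvALoop_eq_spec text.toList mx hmx1 hm _ 0 (by omega)]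
      have harith : (text.toList.length - 0) * (text.toList.length + 2) +
          (min (0 + mx.toNat) text.toList.length - 0) <
          (text.toList.length + 1) * (text.toList.length + 2) := by
        have he : (text.toList.length + 1) * (text.toList.length + 2) =
            text.toList.length * (text.toList.length + 2) + (text.toList.length + 2) := by ring
        generalize hP : text.toList.length * (text.toList.length + 2) = P at he ⊢
        omega
      have hb := pvBLoop_eq_spec text.toList mx.toNat hm
        ((text.toList.length + 1) * (text.toList.length + 2)) 0 0 (le_refl _) (by omega) harith
      rw [show ((-1 : Int)) = pvRfindSpace text.toList 0 (0 - 0) from rfl]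
      exact hb.symm
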